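-- pv_equiv track=rewrite | github.com/sandeepny441/code_101 | Sandeep/Arrays/easy_954.py | solve
-- ===== SOURCE A (Python) =====
-- def solve(nums):
--     if not nums:
--         return None
--     for num in nums:
--         if num == 1:
--             this_nums = nums[nums.index(num)+1:]
--             cur_num = 1
--             if not this_nums:
--                 return True
--             flag_change = 0
--             for this_num in this_nums:
--                 if this_num == 1:
--                     continue
--                 else:
--                     for this_num_2 in this_nums[this_nums.index(this_num)+1:]:
--                         if this_num_2 ==1:
--                             return False
--                     return True
--             return True
--     return False
-- ===== SOURCE B (Python) =====
-- def solve(nums):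
--     if not nums:
--         return None
--     if 1 not in nums:
--         return False
--     seen_non_one = False
--     for x in nums[nums.index(1) + 1:]:
--         if x != 1:
--             seen_non_one = True
--         elif seen_non_one:
--             return False
--     return True
-- ===== Notes on version B (the rewrite author's own statement) =====
-- stated objective: simpler
-- what changed: Replaced A's nested loops with repeated .index()/slice re-scans by two guards (empty, no 1) plus one flat flag-carrying pass over the tail after the first 1.
import Mathlib
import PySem

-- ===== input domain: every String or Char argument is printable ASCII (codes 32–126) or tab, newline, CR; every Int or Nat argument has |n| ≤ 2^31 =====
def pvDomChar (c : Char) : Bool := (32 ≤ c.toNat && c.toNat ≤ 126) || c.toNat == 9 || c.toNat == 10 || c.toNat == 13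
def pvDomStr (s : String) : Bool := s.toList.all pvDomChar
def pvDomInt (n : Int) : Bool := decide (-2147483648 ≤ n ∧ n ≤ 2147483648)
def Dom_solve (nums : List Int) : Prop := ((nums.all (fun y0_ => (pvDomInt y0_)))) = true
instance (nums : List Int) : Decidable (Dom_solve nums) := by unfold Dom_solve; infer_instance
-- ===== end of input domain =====

-- B replaces A's nested loops with .index()/slice re-scans by two guards plus one flat flag-carrying pass: simpler.


-- ===== PORT A =====
-- innermost loop: 'for this_num_2 in …: if this_num_2 == 1: return False' then 'return True'
def solveInner2 : List Int → Bool
  | [] => true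
  | x :: xs => if x == 1 then false else solveInner2 xs

-- middle loop over this_nums (first arg stays the full this_nums for the .index call)
def solveInner (this_nums : List Int) : List Int → Bool
  | [] => true
  | t :: rs =>
    if t == 1 then solveInner this_nums rs
    else
      match PySem.List.index? this_nums t with
      | some j => solveInner2 (PySem.List.slice this_nums (some ((j : Int) + 1)) none)
      | none => true  -- unreachable: t ∈ this_nums

-- outer loop 'for num in nums' (first arg stays the full nums for the .index call)
def solveOuter (nums : List Int) : List Int → Option Bool
  | [] => some false
  | num :: rest =>
    if num == 1 then
      match PySem.List.index? nums num with
      | some i =>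
        let this_nums := PySem.List.slice nums (some ((i : Int) + 1)) none
        if this_nums = [] then some true
        else some (solveInner this_nums this_nums)
      | none => some false  -- unreachable: num ∈ nums
    else solveOuter nums rest

def solve (nums : List Int) : Option Bool :=
  if nums = [] then none else solveOuter nums nums

-- ===== PORT B =====
-- flat pass with a seen_non_one flag; early 'return False' when a 1 follows a non-1
def altScan : Bool → List Int → Bool
  | _, [] => true
  | seen, x :: xs => if x != 1 then altScan true xs else if seen then false else altScan seen xs

def solve_alt (nums : List Int) : Option Bool :=
  if nums = [] then none
  else if nums.contains 1 = false then some false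
  else
    match PySem.List.index? nums 1 with
    | some i => some (altScan false (PySem.List.slice nums (some ((i : Int) + 1)) none))
    | none => some false  -- unreachable: 1 ∈ nums

-- ===== PRECONDITION & SPEC =====
def Spec_solve (nums : List Int) (out : Option Bool) : Prop := out = solve_alt nums
instance (nums : List Int) (out : Option Bool) : Decidable (Spec_solve nums out) := by unfold Spec_solve; infer_instance

-- ===== CLAIM (what is proved, stated in full; the proofs are below) =====
def Claim_equal_solve : Prop := ∀ (nums : List Int), Dom_solve nums → Spec_solve nums (solve nums)

-- ===== LEMMAS AND PROOFS =====

-- first occurrence of v in pre ++ v :: suf when v avoids pre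
theorem index?_append_cons_self (pre suf : List Int) (v : Int) (h : v ∉ pre) :
    PySem.List.index? (pre ++ v :: suf) v = some pre.length := by
  rw [PySem.List.index?_eq_some_iff]
  exact ⟨pre, suf, rfl, rfl, h⟩

theorem slice_from_succ_append (pre suf : List Int) (v : Int) :
    PySem.List.slice (pre ++ v :: suf) (some ((pre.length : Int) + 1)) none = suf := by
  have : ((pre.length : Int) + 1) = ((pre.length + 1 : Nat) : Int) := by push_cast; ring
  rw [this, PySem.List.slice_from_natCast]
  have : pre ++ v :: suf = (pre ++ [v]) ++ suf := by simp
  rw [this, List.drop_left' (by simp)]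

-- the innermost scan decides '1 not in xs'
theorem solveInner2_eq (xs : List Int) : solveInner2 xs = !xs.contains 1 := by
  induction xs with
  | nil => rfl
  | cons x xs ih =>
    by_cases hx : x = 1
    · simp [solveInner2, hx]
    · simp only [solveInner2, ih, List.contains_cons]
      simp [hx]
      exact fun _ h => hx h.symm

-- once the flag is set, altScan also decides '1 not in xs'
theorem altScan_true_eq (xs : List Int) : altScan true xs = !xs.contains 1 := by
  induction xs with
  | nil => rfl
  | cons x xs ih =>
    by_cases hx : x = 1
    · simp [altScan, hx]
    · simp only [altScan, List.contains_cons]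
      simp [hx, ih]
      exact fun _ h => hx h.symm

-- middle loop vs flag scan, under the invariant that everything consumed so far is a 1
theorem solveInner_eq (rest : List Int) : ∀ pre : List Int, (∀ x ∈ pre, x = 1) →
    solveInner (pre ++ rest) rest = altScan false rest := by
  induction rest with
  | nil => intro pre _; rfl
  | cons t rs ih =>
    intro pre hpre
    by_cases ht : t = 1
    · subst ht
      have hall : ∀ x ∈ pre ++ [(1 : Int)], x = 1 := by
        intro x hx
        rcases List.mem_append.1 hx with h | h
        · exact hpre x h
        · simpa using h
      have h1 : solveInner (pre ++ 1 :: rs) (1 :: rs) = solveInner (pre ++ 1 :: rs) rs := by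
        simp [solveInner]
      have h2 : pre ++ 1 :: rs = (pre ++ [1]) ++ rs := by simp
      rw [h1, h2, ih (pre ++ [1]) hall]
      simp [altScan]
    · have hnot : t ∉ pre := fun hm => ht (hpre t hm)
      have hstep : solveInner (pre ++ t :: rs) (t :: rs) =
          (match PySem.List.index? (pre ++ t :: rs) t with
           | some j => solveInner2 (PySem.List.slice (pre ++ t :: rs) (some ((j : Int) + 1)) none)
           | none => true) := by
        simp [solveInner, ht]
      rw [hstep, index?_append_cons_self pre rs t hnot]
      simp only [slice_from_succ_append]
      rw [solveInner2_eq]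
      simp [altScan, ht, altScan_true_eq]

-- outer loop vs B's tail, under the invariant that everything consumed so far is not a 1
theorem solveOuter_eq (rest : List Int) : ∀ pre : List Int, (∀ x ∈ pre, x ≠ 1) →
    solveOuter (pre ++ rest) rest =
      (if (pre ++ rest).contains 1 = false then some false
       else
         match PySem.List.index? (pre ++ rest) 1 with
         | some i => some (altScan false (PySem.List.slice (pre ++ rest) (some ((i : Int) + 1)) none))
         | none => some false) := by
  induction rest with
  | nil =>
    intro pre hpre
    have hc : (pre ++ ([] : List Int)).contains 1 = false := by
      simp only [List.append_nil, List.contains_eq_mem, decide_eq_false_iff_not]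
      exact fun h => hpre 1 h rfl
    rw [if_pos hc]
    rfl
  | cons num rs ih =>
    intro pre hpre
    by_cases hn : num = 1
    · subst hn
      have hnot : (1 : Int) ∉ pre := fun hm => hpre 1 hm rfl
      have hc : (pre ++ 1 :: rs).contains 1 = true := by simp
      have hstep : solveOuter (pre ++ 1 :: rs) (1 :: rs) =
          (match PySem.List.index? (pre ++ 1 :: rs) 1 with
           | some i =>
             let this_nums := PySem.List.slice (pre ++ 1 :: rs) (some ((i : Int) + 1)) none
             if this_nums = [] then some true
             else some (solveInner this_nums this_nums)
           | none => some false) := by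
        simp [solveOuter]
      rw [hstep, hc, index?_append_cons_self pre rs 1 hnot]
      simp only [Bool.true_eq_false, if_false, slice_from_succ_append]
      cases rs with
      | nil => simp [altScan]
      | cons b bs =>
        simp only [reduceCtorEq, if_false, Option.some.injEq]
        exact solveInner_eq (b :: bs) [] (by intro x hx; simp at hx)
    · have hall : ∀ x ∈ pre ++ [num], x ≠ 1 := by
        intro x hx
        rcases List.mem_append.1 hx with h | h
        · exact hpre x h
        · simp only [List.mem_singleton] at h
          rw [h]; exact hn
      have h1 : solveOuter (pre ++ num :: rs) (num :: rs) = solveOuter (pre ++ num :: rs) rs := by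
        simp [solveOuter, hn]
      have h2 : pre ++ num :: rs = (pre ++ [num]) ++ rs := by simp
      rw [h1, h2, ih (pre ++ [num]) hall]

-- ===== VERDICT (by name: the statement is the Claim_ definition above) =====
theorem solve_spec : Claim_equal_solve := by
  intro nums _
  unfold Spec_solve solve solve_alt
  by_cases h : nums = []
  · simp [h]
  · simp only [h, if_false]
    have := solveOuter_eq nums [] (by intro x hx; simp at hx)
    simpa using this
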